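-- pv_equiv track=rewrite | github.com/areye2020/FormInputs | flask_app.py | select_show
-- ===== SOURCE A (Python) =====
-- def select_show(Genre, Type):
--
--     shows = {"Everybody Hates Chris":0, "Crazy Ex Girlfriend":0,"One Tree Hill":0,"The 100":0,"Smallville":0,"The Flash":0,"Riverdale":0,"The Vampire Diaries":0,"Whose Line is it Anyway?":0,"Americas Next Top Model":0}
--
--     if Genre == "Comedy":
--         for show in ["Everybody Hates Chris","Crazy Ex Girlfriend"]:
--             shows[show] += 2
--     elif Genre == "Drama":
--         for show in ["The 100","One Tree Hill"]:
--             shows[show] += 2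
--     elif Genre == "Superhero":
--         for show in ["The Flash","Smallville"]:
--             shows[show] += 2
--     elif Genre == "Suspence":
--         for show in ["Riverdale","The Vampire Diaries"]:
--             shows[show] += 2
--     elif Genre == "Reality":
--         for show in ["Whose Line is it Anyway?","Americas Next Top Model"]:
--             shows[show] += 2
--
--     if Type == "Current":
--         for show in ["Crazy Ex Girlfriend", "The 100", "The Flash", "Riverdale", "Whose Line is it Anyway?"]:
--             shows[show] += 2
--     elif Type == "Past":
--         for show in ["Everybody Hates Chris", "One Tree Hill", "Smallville", "The Vampire Diaries","Americas Next Top Model"]: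
--             shows[show] += 2
--     selected_show = None
--     for show, points in shows.items():
--         if selected_show is None or shows[selected_show] < points:
--             selected_show = show
--
--     return selected_show
-- ===== SOURCE B (Python) =====
-- # B: show-indexed table with one pass gathering per-show scores (A scatters points per category into a dict then scans).
-- SHOW_TABLE = [
--     ("Everybody Hates Chris", "Comedy", "Past"),
--     ("Crazy Ex Girlfriend", "Comedy", "Current"),
--     ("One Tree Hill", "Drama", "Past"),
--     ("The 100", "Drama", "Current"),
--     ("Smallville", "Superhero", "Past"),
--     ("The Flash", "Superhero", "Current"),
--     ("Riverdale", "Suspence", "Current"),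
--     ("The Vampire Diaries", "Suspence", "Past"),
--     ("Whose Line is it Anyway?", "Reality", "Current"),
--     ("Americas Next Top Model", "Reality", "Past"),
-- ]
--
-- def select_show(Genre, Type):
--     best = None
--     best_pts = -1
--     for name, g, t in SHOW_TABLE:
--         pts = 2 * (Genre == g) + 2 * (Type == t)
--         if pts > best_pts:
--             best, best_pts = name, pts
--     return best
-- ===== Notes on version B (the rewrite author's own statement) =====
-- stated objective: simpler
-- what changed: Replaces the category-indexed point-scattering dict (per-genre and per-type loops adding 2 into a mutable dict, then an argmax scan over the dict) with a transposed per-show (name, genre, type) table and a single pass that computes each show's score directly and keeps the first strict maximum.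
import Mathlib
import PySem

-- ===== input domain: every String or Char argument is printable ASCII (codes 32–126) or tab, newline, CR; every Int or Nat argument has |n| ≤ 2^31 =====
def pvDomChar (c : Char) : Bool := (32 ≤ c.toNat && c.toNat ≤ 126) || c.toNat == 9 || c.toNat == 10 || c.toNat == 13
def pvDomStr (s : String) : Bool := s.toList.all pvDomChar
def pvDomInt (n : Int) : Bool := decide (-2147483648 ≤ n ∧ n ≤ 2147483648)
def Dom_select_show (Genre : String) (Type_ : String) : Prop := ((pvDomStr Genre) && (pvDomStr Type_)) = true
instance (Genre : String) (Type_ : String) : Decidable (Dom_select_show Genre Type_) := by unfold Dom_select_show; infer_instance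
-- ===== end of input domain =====

-- B replaces A's category-indexed point-scattering dict with a per-show table and one argmax pass (objective: simpler).

-- ===== PORT A =====
def select_show (Genre : String) (Type_ : String) : String :=
  let shows : PySem.Dict String Int := PySem.Dict.ofList
    [("Everybody Hates Chris", 0), ("Crazy Ex Girlfriend", 0), ("One Tree Hill", 0),
     ("The 100", 0), ("Smallville", 0), ("The Flash", 0), ("Riverdale", 0),
     ("The Vampire Diaries", 0), ("Whose Line is it Anyway?", 0), ("Americas Next Top Model", 0)]
  let shows :=
    if Genre = "Comedy" then
      ["Everybody Hates Chris", "Crazy Ex Girlfriend"].foldl (fun d s => d.modify s 0 (· + 2)) shows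
    else if Genre = "Drama" then
      ["The 100", "One Tree Hill"].foldl (fun d s => d.modify s 0 (· + 2)) shows
    else if Genre = "Superhero" then
      ["The Flash", "Smallville"].foldl (fun d s => d.modify s 0 (· + 2)) shows
    else if Genre = "Suspence" then
      ["Riverdale", "The Vampire Diaries"].foldl (fun d s => d.modify s 0 (· + 2)) shows
    else if Genre = "Reality" then
      ["Whose Line is it Anyway?", "Americas Next Top Model"].foldl (fun d s => d.modify s 0 (· + 2)) shows
    else shows
  let shows :=
    if Type_ = "Current" then
      ["Crazy Ex Girlfriend", "The 100", "The Flash", "Riverdale", "Whose Line is it Anyway?"].foldl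
        (fun d s => d.modify s 0 (· + 2)) shows
    else if Type_ = "Past" then
      ["Everybody Hates Chris", "One Tree Hill", "Smallville", "The Vampire Diaries", "Americas Next Top Model"].foldl
        (fun d s => d.modify s 0 (· + 2)) shows
    else shows
  let selected : Option String :=
    shows.items.foldl
      (fun sel p =>
        match sel with
        | none => some p.1
        | some s => if shows.getD s 0 < p.2 then some p.1 else sel)
      none
  -- Python returns selected_show, which is a str here (the dict is nonempty); none is unreachable.
  selected.getD ""

-- ===== PORT B =====
def showTable : List (String × String × String) :=
  [("Everybody Hates Chris", "Comedy", "Past"),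
   ("Crazy Ex Girlfriend", "Comedy", "Current"),
   ("One Tree Hill", "Drama", "Past"),
   ("The 100", "Drama", "Current"),
   ("Smallville", "Superhero", "Past"),
   ("The Flash", "Superhero", "Current"),
   ("Riverdale", "Suspence", "Current"),
   ("The Vampire Diaries", "Suspence", "Past"),
   ("Whose Line is it Anyway?", "Reality", "Current"),
   ("Americas Next Top Model", "Reality", "Past")]

def select_show_alt (Genre : String) (Type_ : String) : String :=
  let best : Option String × Int :=
    showTable.foldl
      (fun acc row =>
        let pts : Int := (if Genre = row.2.1 then 2 else 0) + (if Type_ = row.2.2 then 2 else 0)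
        if pts > acc.2 then (some row.1, pts) else acc)
      (none, -1)
  -- Python returns best, a str (the table is nonempty so best is never None).
  best.1.getD ""

-- ===== PRECONDITION & SPEC =====
def Spec_select_show (Genre : String) (Type_ : String) (out : String) : Prop := out = select_show_alt Genre Type_
instance (Genre : String) (Type_ : String) (out : String) : Decidable (Spec_select_show Genre Type_ out) := by unfold Spec_select_show; infer_instance

-- ===== CLAIM (what is proved, stated in full; the proofs are below) =====
def Claim_equal_select_show : Prop := ∀ (Genre : String) (Type_ : String), Dom_select_show Genre Type_ → Spec_select_show Genre Type_ (select_show Genre Type_)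

-- ===== LEMMAS AND PROOFS =====

-- ===== VERDICT (by name: the statement is the Claim_ definition above) =====
theorem select_show_spec : Claim_equal_select_show := by
  intro Genre Type_ _
  unfold Spec_select_show
  by_cases h1 : Genre = "Comedy" <;>
  by_cases h2 : Genre = "Drama" <;>
  by_cases h3 : Genre = "Superhero" <;>
  by_cases h4 : Genre = "Suspence" <;>
  by_cases h5 : Genre = "Reality" <;>
  by_cases t1 : Type_ = "Current" <;>
  by_cases t2 : Type_ = "Past" <;>
    simp_all [select_show, select_show_alt, showTable] <;> decide
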